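-- pv_equiv track=rewrite | github.com/mickwise/repl-rlm | src/repl_rlm/experiments/experiment_utils.py | resolve_template_names
-- ===== SOURCE A (Python) =====
-- from typing import Dict, Set, Tuple
--
-- TEMPLATE_ORDER: Tuple[str, ...] = (
--     "single_tool_return",
--     "tool_assign_if",
--     "two_step_branch",
--     "foreach_literal",
--     "simple_aggregation",
--     "spawn_join",
-- )
--
-- def resolve_template_names(include_template_names: Tuple[str, ...] | None) -> Tuple[str, ...]:
--     """
--     Resolve the effective template set in stable declared order.
--
--     Parameters
--     ----------
--     include_template_names : Tuple[str, ...] | None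
--         Optional explicit subset of template names to include.
--
--     Returns
--     -------
--     Tuple[str, ...]
--         Effective template names in fixed generator order.
--
--     Raises
--     ------
--     TypeError
--         When `include_template_names` is neither `None` nor a tuple.
--     ValueError
--         When an unknown template name is requested.
--
--     Notes
--     -----
--     - The returned order is always aligned with `TEMPLATE_ORDER` so output
--       ordering stays stable even when a subset is requested.
--     """
--     if include_template_names is None:
--         return TEMPLATE_ORDER
--     if not isinstance(include_template_names, tuple):
--         raise TypeError("include_template_names must be a tuple of template names or None.")
--
--     requested_names: Set[str] = set(include_template_names)
--     unknown_names: Set[str] = requested_names.difference(TEMPLATE_ORDER)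
--     if unknown_names:
--         unknown_name = sorted(unknown_names)[0]
--         raise ValueError(f"Unsupported template name: {unknown_name}")
--
--     return tuple(
--         template_name for template_name in TEMPLATE_ORDER if template_name in requested_names
--     )
-- ===== SOURCE B (Python) =====
-- from typing import Dict, Set, Tuple
--
-- TEMPLATE_ORDER: Tuple[str, ...] = (
--     "single_tool_return",
--     "tool_assign_if",
--     "two_step_branch",
--     "foreach_literal",
--     "simple_aggregation",
--     "spawn_join",
-- )
--
-- def resolve_template_names(include_template_names: Tuple[str, ...] | None) -> Tuple[str, ...]:
--     if include_template_names is None: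
--         return TEMPLATE_ORDER
--     if not isinstance(include_template_names, tuple):
--         raise TypeError("include_template_names must be a tuple of template names or None.")
--     pos: Dict[str, int] = {name: i for i, name in enumerate(TEMPLATE_ORDER)}
--     requested: Set[str] = set(include_template_names)
--     unknown = [name for name in requested if name not in pos]
--     if unknown:
--         raise ValueError(f"Unsupported template name: {sorted(unknown)[0]}")
--     return tuple(sorted(requested, key=pos.__getitem__))
-- ===== Notes on version B (the rewrite author's own statement) =====
-- stated objective: alternative
-- what changed: Instead of scanning TEMPLATE_ORDER and testing membership of each declared name in the requested set, B builds a name->position index once and sorts the deduplicated requested names by declared position.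
import Mathlib
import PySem

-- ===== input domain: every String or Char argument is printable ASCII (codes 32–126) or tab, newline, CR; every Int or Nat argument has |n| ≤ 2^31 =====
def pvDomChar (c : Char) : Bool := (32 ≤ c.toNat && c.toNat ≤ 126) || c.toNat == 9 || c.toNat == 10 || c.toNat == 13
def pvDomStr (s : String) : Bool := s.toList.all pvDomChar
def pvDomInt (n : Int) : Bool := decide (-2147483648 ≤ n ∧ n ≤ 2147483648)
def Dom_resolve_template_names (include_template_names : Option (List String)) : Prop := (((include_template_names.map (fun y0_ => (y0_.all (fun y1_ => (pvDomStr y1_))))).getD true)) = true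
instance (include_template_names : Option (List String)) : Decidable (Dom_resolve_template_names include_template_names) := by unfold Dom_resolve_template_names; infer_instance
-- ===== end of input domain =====

-- B changes only the production step: sort the deduplicated requested names by a declared-position index
-- instead of filtering TEMPLATE_ORDER by membership (objective: alternative; equivalence proved on Pre_).

def TEMPLATE_ORDER : List String :=
  ["single_tool_return", "tool_assign_if", "two_step_branch",
   "foreach_literal", "simple_aggregation", "spawn_join"]

-- ===== PORT A =====
-- A raises ValueError when a requested name is unknown; those inputs are outside Pre_ (the
-- unknown-name check and the raise are therefore not represented in the returned value).
def resolve_template_names (include_template_names : Option (List String)) : List String :=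
  match include_template_names with
  | none => TEMPLATE_ORDER
  | some names =>
    let requested_names : PySem.Set String := PySem.Set.ofList names
    TEMPLATE_ORDER.filter (fun template_name => PySem.Set.contains requested_names template_name)

-- ===== PORT B =====
-- pos.__getitem__ raises KeyError on a missing key; under Pre_ every requested name is a key of
-- pos, so the total lookup Dict.getD (default 0) computes exactly what Python computes there.
def resolve_template_names_alt (include_template_names : Option (List String)) : List String :=
  match include_template_names with
  | none => TEMPLATE_ORDER
  | some names =>
    let pos : PySem.Dict String Int :=
      PySem.Dict.ofList ((PySem.List.enumerate TEMPLATE_ORDER).map (fun p => (p.2, p.1)))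
    let requested : PySem.Set String := PySem.Set.ofList names
    PySem.List.sorted requested (fun name => PySem.Dict.getD pos name 0) false

-- ===== PRECONDITION & SPEC =====
-- Pre_ excludes exactly the inputs on which A raises: a requested name not in TEMPLATE_ORDER
-- (ValueError). (A tuple argument is the only non-None type admitted by the signature.)
def Pre_resolve_template_names (include_template_names : Option (List String)) : Prop :=
  ∀ n ∈ include_template_names.getD [], n ∈ TEMPLATE_ORDER

instance (include_template_names : Option (List String)) : Decidable (Pre_resolve_template_names include_template_names) := by unfold Pre_resolve_template_names; infer_instance

def pvWitness_resolve_template_names : Option (List String) := some ["spawn_join", "tool_assign_if"]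

def Spec_resolve_template_names (include_template_names : Option (List String)) (out : List String) : Prop := out = resolve_template_names_alt include_template_names
instance (include_template_names : Option (List String)) (out : List String) : Decidable (Spec_resolve_template_names include_template_names out) := by unfold Spec_resolve_template_names; infer_instance

-- ===== CLAIM (what is proved, stated in full; the proofs are below) =====
def Claim_equal_resolve_template_names : Prop := ∀ (include_template_names : Option (List String)), Dom_resolve_template_names include_template_names → Pre_resolve_template_names include_template_names → Spec_resolve_template_names include_template_names (resolve_template_names include_template_names)

-- ===== LEMMAS AND PROOFS =====

-- The key used by B equals the declared position on each member of TEMPLATE_ORDER, so the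
-- declared list is strictly key-increasing (closed computation on the 6 literals).
theorem template_order_pairwise_lt :
    TEMPLATE_ORDER.Pairwise (fun a b =>
      PySem.Dict.getD (PySem.Dict.ofList ((PySem.List.enumerate TEMPLATE_ORDER).map (fun p => (p.2, p.1)))) a 0 <
      PySem.Dict.getD (PySem.Dict.ofList ((PySem.List.enumerate TEMPLATE_ORDER).map (fun p => (p.2, p.1)))) b 0) := by
  decide

theorem template_order_nodup : TEMPLATE_ORDER.Nodup := by decide

-- A's filtered declared list is a rearrangement of the requested set when all names are known.
theorem filter_perm_ofList (names : List String)
    (h : ∀ n ∈ names, n ∈ TEMPLATE_ORDER) :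
    (TEMPLATE_ORDER.filter (fun t => PySem.Set.contains (PySem.Set.ofList names) t)).Perm
      (PySem.Set.ofList names) := by
  rw [List.perm_ext_iff_of_nodup (List.Nodup.filter _ template_order_nodup) (PySem.Set.nodup_ofList names)]
  intro a
  simp only [List.mem_filter, PySem.Set.contains_iff, PySem.Set.mem_ofList]
  constructor
  · rintro ⟨_, ha⟩; simpa [PySem.Set.mem_ofList] using ha
  · intro ha
    exact ⟨h a (by simpa [PySem.Set.mem_ofList] using ha), by simpa [PySem.Set.mem_ofList] using ha⟩

-- ===== VERDICT (by name: the statement is the Claim_ definition above) =====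
theorem resolve_template_names_spec : Claim_equal_resolve_template_names := by
  intro names _ hpre
  unfold Spec_resolve_template_names resolve_template_names resolve_template_names_alt
  match names with
  | none => rfl
  | some ns =>
    simp only
    have hperm := filter_perm_ofList ns (by simpa [Pre_resolve_template_names] using hpre)
    have hpw := List.Pairwise.filter
      (p := fun t => PySem.Set.contains (PySem.Set.ofList ns) t) template_order_pairwise_lt
    exact (PySem.List.sorted_eq_of_perm_of_pairwise_lt _ _ _ hperm hpw).symm
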